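-- pv_equiv track=rewrite | github.com/tcandzq/LeetCode | DynamicProgramming/MaximumLengthOfPairChain.py | findLongestChain
-- ===== SOURCE A (Python) =====
-- from typing import List
--
-- def findLongestChain(pairs: List[List[int]]) -> int:
--     pairs.sort(key=lambda x:x[0])
--     n = len(pairs)
--     dp = [1] * n
--     for i in range(n):
--         for j in range(i):
--             if pairs[i][0] > pairs[j][1]:
--                 dp[i] = max(dp[i], dp[j] + 1)
--     return dp[n - 1]
-- ===== SOURCE B (Python) =====
-- def findLongestChain(pairs):
--     # Sorts `pairs` in place by first element, like the original.
--     pairs.sort(key=lambda x: x[0])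
--     # Pareto frontier of (end value, chain length): only non-dominated
--     # (end, length) summaries of the pairs processed so far are kept.
--     front = []
--     cur = 0
--     for p in pairs:
--         a, b = p[0], p[1]
--         best = 0
--         for e, d in front:
--             if e < a and d > best:
--                 best = d
--         cur = best + 1
--         lo = [t for t in front if t[0] < b]
--         hi = [t for t in front if t[0] >= b and t[1] > cur]
--         if all(d < cur for _, d in lo):
--             front = lo + [(b, cur)] + hi
--         else:
--             front = lo + hi
--     return cur
-- ===== Notes on version B (the rewrite author's own statement) =====
-- stated objective: faster
-- what changed: A fills an O(n^2) DP table by scanning all previous pairs for each pair; B keeps a pruned Pareto frontier of (end value, best chain length) summaries, answering each pair's query from the frontier and inserting/pruning dominated entries, so the per-pair scan runs over the small frontier instead of all previous pairs.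
-- outside the precondition, e.g. on findLongestChain([[5]]): A returns 1, B raises IndexError
import Mathlib
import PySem

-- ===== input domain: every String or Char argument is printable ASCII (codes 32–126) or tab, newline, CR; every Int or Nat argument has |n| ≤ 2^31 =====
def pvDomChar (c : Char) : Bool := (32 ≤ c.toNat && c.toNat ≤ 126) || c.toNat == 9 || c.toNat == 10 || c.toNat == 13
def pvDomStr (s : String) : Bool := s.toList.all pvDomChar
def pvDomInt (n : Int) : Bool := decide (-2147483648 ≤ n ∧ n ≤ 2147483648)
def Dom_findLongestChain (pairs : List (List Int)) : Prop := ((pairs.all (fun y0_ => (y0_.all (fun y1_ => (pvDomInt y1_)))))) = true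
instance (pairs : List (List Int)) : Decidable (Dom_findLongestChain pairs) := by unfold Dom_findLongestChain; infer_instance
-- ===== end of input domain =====

-- B replaces A's inner scan over all previous pairs by a query of a pruned Pareto frontier of
-- (end value, chain length) summaries (objective: faster, measured). Like A, B sorts its argument
-- in place; the equivalence proved here is about the return value.

-- ===== PORT A =====
def findLongestChain (pairs : List (List Int)) : Int :=
  let ps := PySem.List.sorted pairs (fun p => p.getD 0 0)
  let n := ps.length
  let dp0 : List Int := List.replicate n 1
  let dp := (List.range n).foldl (fun dp i =>
    (List.range i).foldl (fun dp j =>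
      if (ps.getD i []).getD 0 0 > (ps.getD j []).getD 1 0 then
        dp.set i (max (dp.getD i 0) (dp.getD j 0 + 1))
      else dp) dp) dp0
  dp.getD (n - 1) 0

-- ===== PORT B =====
-- best chain length among frontier entries with end value < a  (B's inner 'for e, d in front' loop)
def pvQuery (front : List (Int × Int)) (a : Int) : Int :=
  front.foldl (fun best t => if t.1 < a ∧ best < t.2 then t.2 else best) 0

-- insert (b, cur) into the frontier, discarding dominated entries
def pvInsert (front : List (Int × Int)) (b cur : Int) : List (Int × Int) :=
  let lo := front.filter (fun t => decide (t.1 < b))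
  let hi := front.filter (fun t => decide (b ≤ t.1 ∧ cur < t.2))
  if lo.all (fun t => decide (t.2 < cur)) then lo ++ (b, cur) :: hi else lo ++ hi

def findLongestChain_alt (pairs : List (List Int)) : Int :=
  let ps := PySem.List.sorted pairs (fun p => p.getD 0 0)
  (ps.foldl (fun (st : List (Int × Int) × Int) p =>
    let a := p.getD 0 0
    let b := p.getD 1 0
    let cur := pvQuery st.1 a + 1
    (pvInsert st.1 b cur, cur)) ([], 0)).2

-- ===== PRECONDITION & SPEC =====
-- Pre_ excludes the empty list (A's dp[n-1] raises IndexError) and inputs containing a row of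
-- fewer than 2 elements: on almost all of those A's sort key or pairs[j][1] raises IndexError;
-- the exception is a short row that only ever ends the sorted order (e.g. [[5]]), where A
-- returns but B's unconditional read of p[1] naturally raises, so those inputs are excluded too.
def Pre_findLongestChain (pairs : List (List Int)) : Prop :=
  pairs ≠ [] ∧ ∀ p ∈ pairs, 2 ≤ p.length
instance (pairs : List (List Int)) : Decidable (Pre_findLongestChain pairs) := by unfold Pre_findLongestChain; infer_instance

def pvWitness_findLongestChain : List (List Int) := [[1, 2], [3, 4], [0, 7]]

def Spec_findLongestChain (pairs : List (List Int)) (out : Int) : Prop := out = findLongestChain_alt pairs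
instance (pairs : List (List Int)) (out : Int) : Decidable (Spec_findLongestChain pairs out) := by unfold Spec_findLongestChain; infer_instance

-- ===== CLAIM (what is proved, stated in full; the proofs are below) =====
def Claim_equal_findLongestChain : Prop := ∀ (pairs : List (List Int)), Dom_findLongestChain pairs → Pre_findLongestChain pairs → Spec_findLongestChain pairs (findLongestChain pairs)

-- ===== LEMMAS AND PROOFS =====
def pvMaxd (st : List (Int × Int)) (a : Int) : Int :=
  st.foldl (fun m t => if t.1 < a then max m t.2 else m) 0

theorem pvQuery_aux (front : List (Int × Int)) (v : Int) : ∀ (b m : Int),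
    (front.foldl (fun best t => if t.1 < v ∧ best < t.2 then t.2 else best) b ≤ m ↔
      b ≤ m ∧ ∀ t ∈ front, t.1 < v → t.2 ≤ m) := by
  induction front with
  | nil => simp
  | cons t ft ih =>
    intro b m
    simp only [List.foldl_cons, List.mem_cons]
    rw [ih]
    constructor
    · rintro ⟨h1, h2⟩
      split_ifs at h1 with hc
      · refine ⟨by omega, ?_⟩
        rintro s (rfl | hs) hsv
        · omega
        · exact h2 s hs hsv
      · refine ⟨h1, ?_⟩
        rintro s (rfl | hs) hsv
        · omega
        · exact h2 s hs hsv
    · rintro ⟨h1, h2⟩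
      refine ⟨?_, fun s hs hsv => h2 s (Or.inr hs) hsv⟩
      split_ifs with hc
      · exact h2 t (Or.inl rfl) hc.1
      · exact h1

theorem pvMaxd_aux (st : List (Int × Int)) (v : Int) : ∀ (b m : Int),
    (st.foldl (fun acc t => if t.1 < v then max acc t.2 else acc) b ≤ m ↔
      b ≤ m ∧ ∀ t ∈ st, t.1 < v → t.2 ≤ m) := by
  induction st with
  | nil => simp
  | cons t ft ih =>
    intro b m
    simp only [List.foldl_cons, List.mem_cons]
    rw [ih]
    constructor
    · rintro ⟨h1, h2⟩
      split_ifs at h1 with hc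
      · refine ⟨by omega, ?_⟩
        rintro s (rfl | hs) hsv
        · omega
        · exact h2 s hs hsv
      · refine ⟨h1, ?_⟩
        rintro s (rfl | hs) hsv
        · exact absurd hsv hc
        · exact h2 s hs hsv
    · rintro ⟨h1, h2⟩
      refine ⟨?_, fun s hs hsv => h2 s (Or.inr hs) hsv⟩
      split_ifs with hc
      · have := h2 t (Or.inl rfl) hc; omega
      · exact h1

theorem pvQuery_le_iff (front : List (Int × Int)) (v m : Int) :
    pvQuery front v ≤ m ↔ 0 ≤ m ∧ ∀ t ∈ front, t.1 < v → t.2 ≤ m := by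
  unfold pvQuery; rw [pvQuery_aux]

theorem pvMaxd_le_iff (st : List (Int × Int)) (v m : Int) :
    pvMaxd st v ≤ m ↔ 0 ≤ m ∧ ∀ t ∈ st, t.1 < v → t.2 ≤ m := by
  unfold pvMaxd; rw [pvMaxd_aux]

theorem le_pvQuery (front : List (Int × Int)) (v : Int) (t : Int × Int)
    (ht : t ∈ front) (htv : t.1 < v) : t.2 ≤ pvQuery front v :=
  ((pvQuery_le_iff front v _).mp le_rfl).2 t ht htv

theorem pvQuery_nonneg (front : List (Int × Int)) (v : Int) : 0 ≤ pvQuery front v :=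
  ((pvQuery_le_iff front v _).mp le_rfl).1

theorem le_pvMaxd (st : List (Int × Int)) (v : Int) (t : Int × Int)
    (ht : t ∈ st) (htv : t.1 < v) : t.2 ≤ pvMaxd st v :=
  ((pvMaxd_le_iff st v _).mp le_rfl).2 t ht htv

theorem pvMaxd_nonneg (st : List (Int × Int)) (v : Int) : 0 ≤ pvMaxd st v :=
  ((pvMaxd_le_iff st v _).mp le_rfl).1

theorem pvInsert_bounds (front : List (Int × Int)) (b cur v : Int) :
    (b < v → cur ≤ pvQuery (pvInsert front b cur) v) ∧
    (∀ t ∈ front, t.1 < v → t.2 ≤ pvQuery (pvInsert front b cur) v) := by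
  simp only [pvInsert]
  by_cases hall : (front.filter (fun t => decide (t.1 < b))).all (fun t => decide (t.2 < cur)) = true
  · rw [if_pos hall]
    have hbc : (b, cur) ∈ front.filter (fun t => decide (t.1 < b)) ++
        (b, cur) :: front.filter (fun t => decide (b ≤ t.1 ∧ cur < t.2)) := by
      simp
    refine ⟨fun hbv => le_pvQuery _ v (b, cur) hbc hbv, ?_⟩
    intro t ht htv
    by_cases htb : t.1 < b
    · exact le_pvQuery _ v t (by simp [List.mem_filter, ht, htb]) htv
    · by_cases hct : cur < t.2
      · exact le_pvQuery _ v t (by simp [List.mem_filter, ht, htb, hct]; omega) htv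
      · have : cur ≤ pvQuery _ v := le_pvQuery _ v (b, cur) hbc (by omega)
        omega
  · rw [if_neg hall]
    obtain ⟨t0, ht0, ht0c⟩ : ∃ t0 ∈ front.filter (fun t => decide (t.1 < b)), ¬ (t0.2 < cur) := by
      rcases List.all_eq_false.mp (Bool.not_eq_true _ ▸ hall) with ⟨t0, h1, h2⟩
      exact ⟨t0, h1, by simpa using h2⟩
    have ht0b : t0.1 < b := by have := (List.mem_filter.mp ht0).2; simpa using this
    have ht0f : t0 ∈ front := (List.mem_filter.mp ht0).1
    have ht0mem : t0 ∈ front.filter (fun t => decide (t.1 < b)) ++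
        front.filter (fun t => decide (b ≤ t.1 ∧ cur < t.2)) := List.mem_append_left _ ht0
    refine ⟨fun hbv => le_trans (by omega) (le_pvQuery _ v t0 ht0mem (by omega)), ?_⟩
    intro t ht htv
    by_cases htb : t.1 < b
    · exact le_pvQuery _ v t (List.mem_append_left _ (by simp [List.mem_filter, ht, htb])) htv
    · by_cases hct : cur < t.2
      · exact le_pvQuery _ v t (List.mem_append_right _ (by simp [List.mem_filter, ht]; omega)) htv
      · have : t0.2 ≤ pvQuery _ v := le_pvQuery _ v t0 ht0mem (by omega)
        omega

theorem pvInsert_query (front : List (Int × Int)) (st : List (Int × Int)) (b cur v : Int)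
    (h : ∀ w, pvQuery front w = pvMaxd st w) :
    pvQuery (pvInsert front b cur) v = pvMaxd (st ++ [(b, cur)]) v := by
  apply le_antisymm
  · rw [pvQuery_le_iff]
    refine ⟨pvMaxd_nonneg _ _, ?_⟩
    intro t ht htv
    have hmem : t = (b, cur) ∨ t ∈ front := by
      simp only [pvInsert] at ht
      split_ifs at ht with hall
      · rcases List.mem_append.mp ht with h1 | h1
        · exact Or.inr (List.mem_filter.mp h1).1
        · rcases List.mem_cons.mp h1 with h2 | h2
          · exact Or.inl h2
          · exact Or.inr (List.mem_filter.mp h2).1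
      · rcases List.mem_append.mp ht with h1 | h1
        · exact Or.inr (List.mem_filter.mp h1).1
        · exact Or.inr (List.mem_filter.mp h1).1
    rcases hmem with rfl | hf
    · exact le_pvMaxd _ v (b, cur) (by simp) htv
    · calc t.2 ≤ pvQuery front v := le_pvQuery front v t hf htv
        _ = pvMaxd st v := h v
        _ ≤ pvMaxd (st ++ [(b, cur)]) v := by
            rw [pvMaxd_le_iff]
            exact ⟨pvMaxd_nonneg _ _, fun s hs hsv =>
              le_pvMaxd _ v s (List.mem_append_left _ hs) hsv⟩
  · rw [pvMaxd_le_iff]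
    refine ⟨pvQuery_nonneg _ _, ?_⟩
    intro s hs hsv
    rcases List.mem_append.mp hs with h1 | h1
    · have hfb : ∀ t ∈ front, t.1 < v → t.2 ≤ pvQuery (pvInsert front b cur) v :=
        (pvInsert_bounds front b cur v).2
      have : pvQuery front v ≤ pvQuery (pvInsert front b cur) v := by
        rw [pvQuery_le_iff]; exact ⟨pvQuery_nonneg _ _, hfb⟩
      have hsm : s.2 ≤ pvMaxd st v := le_pvMaxd st v s h1 hsv
      rw [← h v] at hsm; omega
    · simp only [List.mem_singleton] at h1
      subst h1
      exact (pvInsert_bounds front b cur v).1 hsv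

def pvAbsFold (qs : List (List Int)) (st : List (Int × Int)) (c : Int) : List (Int × Int) × Int :=
  qs.foldl (fun s p =>
    (s.1 ++ [(p.getD 1 0, 1 + pvMaxd s.1 (p.getD 0 0))], 1 + pvMaxd s.1 (p.getD 0 0))) (st, c)

theorem pvB_loop : ∀ (qs : List (List Int)) (front : List (Int × Int)) (c : Int)
    (st : List (Int × Int)), (∀ w, pvQuery front w = pvMaxd st w) →
    (qs.foldl (fun (s : List (Int × Int) × Int) p =>
        (pvInsert s.1 (p.getD 1 0) (pvQuery s.1 (p.getD 0 0) + 1),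
          pvQuery s.1 (p.getD 0 0) + 1)) (front, c)).2 = (pvAbsFold qs st c).2 ∧
    ∀ w, pvQuery ((qs.foldl (fun (s : List (Int × Int) × Int) p =>
        (pvInsert s.1 (p.getD 1 0) (pvQuery s.1 (p.getD 0 0) + 1),
          pvQuery s.1 (p.getD 0 0) + 1)) (front, c)).1) w = pvMaxd (pvAbsFold qs st c).1 w := by
  intro qs
  induction qs with
  | nil => intro front c st h; exact ⟨rfl, h⟩
  | cons p rest ih =>
    intro front c st h
    have hq : pvQuery front (p.getD 0 0) + 1 = 1 + pvMaxd st (p.getD 0 0) := by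
      rw [h]; omega
    have h' : ∀ w, pvQuery (pvInsert front (p.getD 1 0) (1 + pvMaxd st (p.getD 0 0))) w
        = pvMaxd (st ++ [(p.getD 1 0, 1 + pvMaxd st (p.getD 0 0))]) w := by
      intro w
      rw [← hq]
      rw [pvInsert_query front st _ _ w h, hq]
    simp only [pvAbsFold, List.foldl_cons]
    rw [hq]
    exact ih _ _ _ h'

theorem pvAbsFold_append (l1 l2 : List (List Int)) (st : List (Int × Int)) (c : Int) :
    pvAbsFold (l1 ++ l2) st c = pvAbsFold l2 (pvAbsFold l1 st c).1 (pvAbsFold l1 st c).2 := by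
  simp only [pvAbsFold, List.foldl_append]

theorem pvAbsFold_fst_len (qs : List (List Int)) : ∀ (st : List (Int × Int)) (c : Int),
    (pvAbsFold qs st c).1.length = st.length + qs.length := by
  induction qs with
  | nil => intro st c; simp [pvAbsFold]
  | cons p rest ih =>
    intro st c
    simp only [pvAbsFold, List.foldl_cons] at *
    rw [ih]; simp; omega

theorem pvAbsFold_fst_fst (qs : List (List Int)) : ∀ (st : List (Int × Int)) (c : Int),
    (pvAbsFold qs st c).1.map (·.1) = st.map (·.1) ++ qs.map (fun p => p.getD 1 0) := by
  induction qs with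
  | nil => intro st c; simp [pvAbsFold]
  | cons p rest ih =>
    intro st c
    simp only [pvAbsFold, List.foldl_cons, List.map_cons] at *
    rw [ih]; simp

-- reading a fold over indices is a fold over the list

theorem pvFoldl_range_getD {α β : Type} (d : α) (F : β → α → β) :
    ∀ (l : List α) (init : β),
    (List.range l.length).foldl (fun v j => F v (l.getD j d)) init = l.foldl F init := by
  intro l
  induction l using List.reverseRecOn with
  | nil => intro init; simp
  | append_singleton l x ih =>
    intro init
    rw [List.length_append, List.length_singleton, List.range_succ, List.foldl_append,
      List.foldl_append]
    have hcongr : (List.range l.length).foldl (fun v j => F v ((l ++ [x]).getD j d)) init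
        = (List.range l.length).foldl (fun v j => F v (l.getD j d)) init := by
      apply List.foldl_ext
      intro a j hj
      rw [List.getD_append _ _ _ _ (List.mem_range.mp hj)]
    rw [hcongr, ih]
    simp only [List.foldl_cons, List.foldl_nil]
    rw [List.getD_append_right _ _ _ _ (le_refl l.length), Nat.sub_self]
    rfl

theorem pvMaxd_shift (a : Int) : ∀ (st : List (Int × Int)) (m : Int),
    st.foldl (fun v t => if t.1 < a then max v (t.2 + 1) else v) (m + 1)
      = 1 + st.foldl (fun v t => if t.1 < a then max v t.2 else v) m := by
  intro st
  induction st with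
  | nil => intro m; simp; omega
  | cons t rest ih =>
    intro m
    simp only [List.foldl_cons]
    split_ifs with hc
    · have : max (m + 1) (t.2 + 1) = max m t.2 + 1 := by omega
      rw [this, ih]
    · exact ih m

theorem pv_set_getD_cancel (l : List Int) (k : Nat) (h : k < l.length) :
    l.set k (l.getD k 0) = l := by
  rw [List.getD_eq_getElem l 0 h, List.set_getElem_self]

theorem pv_getD_set_ne (l : List Int) (k j : Nat) (w : Int) (h : j ≠ k) :
    (l.set k w).getD j 0 = l.getD j 0 := by
  simp [List.getD, Ne.symm h]

theorem pv_getD_set_self (l : List Int) (k : Nat) (w : Int) (h : k < l.length) :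
    (l.set k w).getD k 0 = w := by
  simp [List.getD, h]

theorem pvInner_fold (k : Nat) (C : Nat → Prop) [DecidablePred C] :
    ∀ (js : List Nat) (dp : List Int), (∀ j ∈ js, j < k) → k < dp.length →
    js.foldl (fun d j => if C j then d.set k (max (d.getD k 0) (d.getD j 0 + 1)) else d) dp
      = dp.set k (js.foldl (fun v j => if C j then max v (dp.getD j 0 + 1) else v) (dp.getD k 0)) := by
  intro js
  induction js with
  | nil =>
    intro dp _ hk
    simp only [List.foldl_nil]
    exact (pv_set_getD_cancel dp k hk).symm
  | cons j rest ih =>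
    intro dp hjs hk
    simp only [List.foldl_cons]
    have hjk : j < k := hjs j (List.mem_cons_self)
    split_ifs with hc
    · rw [ih _ (fun j' hj' => hjs j' (List.mem_cons_of_mem _ hj')) (by simpa using hk)]
      rw [List.set_set]
      congr 1
      rw [pv_getD_set_self dp k _ hk]
      apply List.foldl_ext
      intro a j' hj'
      rw [pv_getD_set_ne dp k j' _ (by have := hjs j' (List.mem_cons_of_mem _ hj'); omega)]
    · exact ih _ (fun j' hj' => hjs j' (List.mem_cons_of_mem _ hj')) hk

theorem pvAbsFold_singleton (p : List Int) (st : List (Int × Int)) (c : Int) :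
    pvAbsFold [p] st c
      = (st ++ [(p.getD 1 0, 1 + pvMaxd st (p.getD 0 0))], 1 + pvMaxd st (p.getD 0 0)) := rfl

theorem pvA_inv (qs : List (List Int)) : ∀ k, k ≤ qs.length →
    (List.range k).foldl (fun dp i =>
      (List.range i).foldl (fun dp j =>
        if (qs.getD i []).getD 0 0 > (qs.getD j []).getD 1 0 then
          dp.set i (max (dp.getD i 0) (dp.getD j 0 + 1))
        else dp) dp) (List.replicate qs.length 1)
    = (pvAbsFold (qs.take k) [] 0).1.map (fun t : Int × Int => t.2) ++ List.replicate (qs.length - k) 1 := by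
  intro k
  induction k with
  | zero => intro _; simp [pvAbsFold]
  | succ k ih =>
    intro hk1
    have hk : k < qs.length := by omega
    rw [List.range_succ, List.foldl_append, ih (by omega)]
    simp only [List.foldl_cons, List.foldl_nil]
    set S := (pvAbsFold (qs.take k) [] 0).1 with hS
    have hSlen : S.length = k := by
      rw [hS, pvAbsFold_fst_len]; simp [List.length_take]; omega
    have hmaplen : (S.map (fun t : Int × Int => t.2)).length = k := by simp [hSlen]
    have hprevlen : (S.map (fun t : Int × Int => t.2) ++ List.replicate (qs.length - k) 1).length = qs.length := by
      simp [hmaplen]; omega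
    rw [pvInner_fold k (fun j => (qs.getD k []).getD 0 0 > (qs.getD j []).getD 1 0)
      (List.range k) _ (fun j hj => List.mem_range.mp hj) (by omega)]
    have hgetk : (S.map (fun t : Int × Int => t.2) ++ List.replicate (qs.length - k) 1).getD k 0 = 1 := by
      rw [List.getD_append_right _ _ _ _ (by omega), hmaplen, Nat.sub_self]
      have : 0 < qs.length - k := by omega
      simp [List.getD, List.getElem?_replicate_of_lt this]
    have hgetj : ∀ j, j < k →
        (S.map (fun t : Int × Int => t.2) ++ List.replicate (qs.length - k) 1).getD j 0 = (S.getD j (0, 0)).2 := by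
      intro j hj
      rw [List.getD_append _ _ _ _ (by omega)]
      simp [List.getD, List.getElem?_map, List.getElem?_eq_getElem (by omega : j < S.length)]
    have hfst : ∀ j, j < k → (S.getD j (0, 0)).1 = (qs.getD j []).getD 1 0 := by
      intro j hj
      have h1 : (S.map (fun t : Int × Int => t.1)).getD j 0 = (S.getD j (0, 0)).1 := by
        simp [List.getD, List.getElem?_map, List.getElem?_eq_getElem (by omega : j < S.length)]
      rw [← h1, hS, pvAbsFold_fst_fst]
      simp only [List.map_nil, List.nil_append]
      rw [List.getD_eq_getElem _ _ (by simp [List.length_take]; omega)]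
      simp only [List.getElem_map]
      rw [List.getElem_take, List.getD_eq_getElem qs [] (by omega)]
    have hVal : (List.range k).foldl (fun v j =>
        if (qs.getD k []).getD 0 0 > (qs.getD j []).getD 1 0 then
          max v ((S.map (fun t : Int × Int => t.2) ++ List.replicate (qs.length - k) 1).getD j 0 + 1) else v)
        ((S.map (fun t : Int × Int => t.2) ++ List.replicate (qs.length - k) 1).getD k 0)
        = 1 + pvMaxd S ((qs.getD k []).getD 0 0) := by
      rw [hgetk]
      have hext : (List.range k).foldl (fun v j =>
          if (qs.getD k []).getD 0 0 > (qs.getD j []).getD 1 0 then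
            max v ((S.map (fun t : Int × Int => t.2) ++ List.replicate (qs.length - k) 1).getD j 0 + 1) else v) 1
          = (List.range k).foldl (fun v j =>
            if (S.getD j (0, 0)).1 < (qs.getD k []).getD 0 0 then
              max v ((S.getD j (0, 0)).2 + 1) else v) 1 := by
        apply List.foldl_ext
        intro a j hj
        rw [hgetj j (List.mem_range.mp hj), hfst j (List.mem_range.mp hj)]
      rw [hext, show List.range k = List.range S.length from by rw [hSlen]]
      rw [pvFoldl_range_getD (0, 0)
        (fun v t => if t.1 < (qs.getD k []).getD 0 0 then max v (t.2 + 1) else v) S 1]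
      have := pvMaxd_shift ((qs.getD k []).getD 0 0) S 0
      simpa [pvMaxd] using this
    rw [hVal]
    rw [List.set_append_right _ _ (by omega), hmaplen, Nat.sub_self]
    have hrep : List.replicate (qs.length - k) (1 : Int) = 1 :: List.replicate (qs.length - (k+1)) 1 := by
      have : qs.length - k = (qs.length - (k+1)) + 1 := by omega
      rw [this, List.replicate_succ]
    rw [hrep, List.set_cons_zero]
    rw [List.take_succ_eq_append_getElem hk, pvAbsFold_append, pvAbsFold_singleton, ← hS]
    have ha : (qs[k].getD 0 0) = (qs.getD k []).getD 0 0 := by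
      rw [List.getD_eq_getElem qs [] hk]
    rw [List.map_append, ha]
    simp

theorem pvAbsFold_last (qs : List (List Int)) (hq : qs ≠ []) :
    ((pvAbsFold qs [] 0).1.map (fun t : Int × Int => t.2)).getD ((pvAbsFold qs [] 0).1.length - 1) 0
      = (pvAbsFold qs [] 0).2 := by
  induction qs using List.reverseRecOn with
  | nil => exact absurd rfl hq
  | append_singleton l x _ =>
    rw [pvAbsFold_append]
    simp only [pvAbsFold, List.foldl_cons, List.foldl_nil, List.map_append]
    set S := (List.foldl _ ([], 0) l : List (Int × Int) × Int).1 with hS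
    rw [List.getD_append_right _ _ _ _ (by simp)]
    simp

theorem pvMain (qs : List (List Int)) (hq : qs ≠ []) :
    (((List.range qs.length).foldl (fun dp i =>
      (List.range i).foldl (fun dp j =>
        if (qs.getD i []).getD 0 0 > (qs.getD j []).getD 1 0 then
          dp.set i (max (dp.getD i 0) (dp.getD j 0 + 1))
        else dp) dp) (List.replicate qs.length 1)).getD (qs.length - 1) 0)
    = (qs.foldl (fun (s : List (Int × Int) × Int) p =>
        (pvInsert s.1 (p.getD 1 0) (pvQuery s.1 (p.getD 0 0) + 1),
          pvQuery s.1 (p.getD 0 0) + 1)) ([], 0)).2 := by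
  rw [pvA_inv qs qs.length le_rfl, List.take_length, Nat.sub_self, List.replicate_zero,
    List.append_nil]
  have hlen : (pvAbsFold qs [] 0).1.length = qs.length := by
    rw [pvAbsFold_fst_len]; simp
  rw [show qs.length - 1 = (pvAbsFold qs [] 0).1.length - 1 from by rw [hlen]]
  have hlast := pvAbsFold_last qs hq
  have hb := (pvB_loop qs [] 0 [] (fun w => rfl)).1
  rw [hb]
  exact hlast

-- ===== VERDICT (by name: the statement is the Claim_ definition above) =====
theorem findLongestChain_spec : Claim_equal_findLongestChain := by
  intro pairs _ hpre
  unfold Spec_findLongestChain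
  have hqs : PySem.List.sorted pairs (fun p => p.getD 0 0) ≠ [] := by
    intro hc
    exact hpre.1 ((PySem.List.sorted_eq_nil_iff pairs (fun p => p.getD 0 0) false).mp hc)
  exact pvMain _ hqs
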